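-- pv_equiv track=rewrite | github.com/tam1006/Atcoder-Beginner-Contest | problems/ABC/279/a/abc279_a.py | solve
-- ===== SOURCE A (Python) =====
-- def solve(S):
--     ans = 0
--     for s in S:
--         if s == 'v':
--             ans += 1
--         elif s == 'w':
--             ans += 2
--
--     return ans
-- ===== SOURCE B (Python) =====
-- def solve(S):
--     return S.count('v') + 2 * S.count('w')
-- ===== Notes on version B (the rewrite author's own statement) =====
-- stated objective: simpler
-- what changed: Replaced the single branching accumulator loop with two library str.count passes combined arithmetically, with no explicit loop or conditionals.
import Mathlib
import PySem

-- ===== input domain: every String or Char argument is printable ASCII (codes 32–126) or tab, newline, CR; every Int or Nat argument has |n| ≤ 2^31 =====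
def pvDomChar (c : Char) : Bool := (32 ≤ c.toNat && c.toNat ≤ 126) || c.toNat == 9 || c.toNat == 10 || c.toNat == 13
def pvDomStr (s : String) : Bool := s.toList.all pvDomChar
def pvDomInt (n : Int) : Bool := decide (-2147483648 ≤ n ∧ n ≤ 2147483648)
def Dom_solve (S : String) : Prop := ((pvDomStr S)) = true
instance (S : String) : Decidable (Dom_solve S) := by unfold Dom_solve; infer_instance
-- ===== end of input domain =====

-- B replaces A's single branching accumulator loop with two library count passes combined arithmetically (simpler).

-- ===== PORT A =====
-- for s in S: if s == 'v': ans += 1 elif s == 'w': ans += 2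
def solve (S : String) : Int :=
  S.toList.foldl (fun ans s => if s == 'v' then ans + 1 else if s == 'w' then ans + 2 else ans) 0

-- ===== PORT B =====
-- return S.count('v') + 2 * S.count('w')
def solve_alt (S : String) : Int :=
  (PySem.Str.count S "v" : Int) + 2 * (PySem.Str.count S "w" : Int)

-- ===== PRECONDITION & SPEC =====
def Spec_solve (S : String) (out : Int) : Prop := out = solve_alt S
instance (S : String) (out : Int) : Decidable (Spec_solve S out) := by unfold Spec_solve; infer_instance

-- ===== CLAIM (what is proved, stated in full; the proofs are below) =====
def Claim_equal_solve : Prop := ∀ (S : String), Dom_solve S → Spec_solve S (solve S)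

-- ===== LEMMAS AND PROOFS =====
theorem go_single (c : Char) (l : List Char) : ∀ (fuel acc : Nat), l.length ≤ fuel →
    PySem.Chars.count.go [c] fuel l acc = acc + l.count c := by
  induction l with
  | nil => intro fuel acc _; cases fuel <;> simp [PySem.Chars.count.go]
  | cons h t ih =>
    intro fuel acc hf
    cases fuel with
    | zero => simp at hf
    | succ n =>
      simp only [List.length_cons, Nat.succ_le_succ_iff] at hf
      rw [PySem.Chars.count.go]
      by_cases hc : h = c
      · subst hc
        simp [List.isPrefixOf, ih n _ hf]
        omega
      · have hp : ¬ ([c].isPrefixOf (h :: t)) := by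
          simp [List.isPrefixOf]; exact fun e => hc e.symm
        simp [hp, ih n _ hf, hc]

theorem count_single (c : Char) (l : List Char) : PySem.Chars.count l [c] = l.count c := by
  simp [PySem.Chars.count, go_single c l l.length 0 le_rfl]

theorem foldl_vw (l : List Char) : ∀ (a : Int),
    l.foldl (fun ans s => if s == 'v' then ans + 1 else if s == 'w' then ans + 2 else ans) a
      = a + (l.count 'v' : Int) + 2 * (l.count 'w' : Int) := by
  induction l with
  | nil => intro a; simp
  | cons h t ih =>
    intro a
    simp only [List.foldl_cons, ih, List.count_cons]
    by_cases hv : h = 'v' <;> by_cases hw : h = 'w' <;> simp_all <;> ring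

-- ===== VERDICT (by name: the statement is the Claim_ definition above) =====
theorem solve_spec : Claim_equal_solve := by
  intro S _
  unfold Spec_solve solve solve_alt PySem.Str.count
  rw [foldl_vw]
  simp [count_single]
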